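-- pv_equiv track=rewrite | github.com/CARLOSGUTIERREZPENAFIEL/Info1-2 | INFORMATICA 1/LAB_2023-1/PRACTICA 4/ahorcado.py | palabraAdivinada
-- ===== SOURCE A (Python) =====
-- def palabraAdivinada(palabra,letrasIntentadas):
--     '''
--     Firma:
--         (string,string) -> (bool)
--
--     Sinopsis:
--         Determina si con las letras ingresadas se puede formar la palabra secreta.
--
--     Entradas y salidas:
--         - palabra: Palabra o frase a verificar
--         - letrasIntentadas: String con las letras a comparar
--         - returns: Devuelve True si todas las letras de palabra se encuentran en letrasIntentadas, False en caso contrario.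
--
--     Ejemplos de uso: m
--         >>> palabraAdivinada('bilbo','bsnlio')
--         True
--
--         >>> palabraAdivinada('karman','cam')
--         False
--
--     '''
--
--     # Desarrolle el cuerpo de la función aquí...
--     li = ""
--     for i in palabra:
--         if i in letrasIntentadas:
--             li += i
--         elif i == " ":
--             li += " "
--         else:
--             li += "_ "
--     if li == palabra:
--         return True
--     else:
--         return False
-- ===== SOURCE B (Python) =====
-- def palabraAdivinada(palabra, letrasIntentadas):
--     return all(c in letrasIntentadas or c == ' ' for c in palabra)
-- ===== Notes on version B (the rewrite author's own statement) =====
-- stated objective: simpler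
-- what changed: Instead of building a masked string character by character and comparing it to the whole word, B is a single short-circuiting predicate: every character is in letrasIntentadas or is a space.
import Mathlib
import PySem

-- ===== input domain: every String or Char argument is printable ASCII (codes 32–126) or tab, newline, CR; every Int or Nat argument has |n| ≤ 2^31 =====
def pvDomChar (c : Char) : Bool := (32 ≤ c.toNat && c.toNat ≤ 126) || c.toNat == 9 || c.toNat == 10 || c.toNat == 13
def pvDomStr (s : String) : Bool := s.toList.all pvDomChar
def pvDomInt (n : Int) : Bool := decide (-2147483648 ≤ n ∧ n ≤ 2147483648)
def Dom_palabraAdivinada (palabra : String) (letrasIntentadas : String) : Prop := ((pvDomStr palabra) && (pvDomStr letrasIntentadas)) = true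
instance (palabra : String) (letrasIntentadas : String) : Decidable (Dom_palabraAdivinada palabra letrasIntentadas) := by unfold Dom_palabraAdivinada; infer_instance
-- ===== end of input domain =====

-- B replaces A's masked-string accumulator + full-string comparison with one short-circuiting
-- all-characters predicate (simpler); return values are proved identical.


-- ===== PORT A =====
-- token appended for a character i of palabra: 'i' in letrasIntentadas (single char, so
-- substring test = char membership), ' ' for a space, "_ " otherwise — exactly A's branches
def pvTokA (letrasIntentadas : List Char) (i : Char) : List Char :=
  if letrasIntentadas.contains i then [i] else if i = ' ' then [' '] else ['_', ' ']

-- li = ""; for i in palabra: li += <token>; return True if li == palabra else False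
def palabraAdivinada (palabra : String) (letrasIntentadas : String) : Bool :=
  if palabra.toList.foldl (fun acc i => acc ++ pvTokA letrasIntentadas.toList i) []
      = palabra.toList then true else false

-- ===== PORT B =====
def palabraAdivinada_alt (palabra : String) (letrasIntentadas : String) : Bool :=
  palabra.toList.all (fun c => letrasIntentadas.toList.contains c || c == ' ')

-- ===== PRECONDITION & SPEC =====
def Spec_palabraAdivinada (palabra : String) (letrasIntentadas : String) (out : Bool) : Prop := out = palabraAdivinada_alt palabra letrasIntentadas
instance (palabra : String) (letrasIntentadas : String) (out : Bool) : Decidable (Spec_palabraAdivinada palabra letrasIntentadas out) := by unfold Spec_palabraAdivinada; infer_instance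

-- ===== CLAIM (what is proved, stated in full; the proofs are below) =====
def Claim_equal_palabraAdivinada : Prop := ∀ (palabra : String) (letrasIntentadas : String), Dom_palabraAdivinada palabra letrasIntentadas → Spec_palabraAdivinada palabra letrasIntentadas (palabraAdivinada palabra letrasIntentadas)

-- ===== LEMMAS AND PROOFS =====

-- every token is nonempty, so the masked list is at least as long as the word
theorem pvTokA_len (ls : List Char) (i : Char) : 1 ≤ (pvTokA ls i).length := by
  unfold pvTokA; split_ifs <;> simp

theorem pvLen_flatMap_ge (ls : List Char) (l : List Char) :
    l.length ≤ (l.flatMap (pvTokA ls)).length := by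
  induction l with
  | nil => simp
  | cons c t ih =>
    rw [List.flatMap_cons, List.length_append, List.length_cons]
    have := pvTokA_len ls c
    omega

-- the masked list equals the word iff every character passes B's predicate
theorem pvMask_eq_iff (ls : List Char) (l : List Char) :
    (l.flatMap (pvTokA ls) = l) ↔ (l.all (fun c => ls.contains c || c == ' ') = true) := by
  induction l with
  | nil => simp
  | cons c t ih =>
    rw [List.flatMap_cons, List.all_cons, Bool.and_eq_true, ← ih]
    by_cases hm : c ∈ ls
    · have ht : pvTokA ls c = [c] := by simp [pvTokA, hm]
      simp [ht, hm]
    · by_cases h2 : c = ' '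
      · subst h2
        have ht : pvTokA ls ' ' = [' '] := by simp [pvTokA, hm]
        simp [ht, hm]
      · have ht : pvTokA ls c = ['_', ' '] := by simp [pvTokA, hm, h2]
        rw [ht]
        constructor
        · intro h
          exfalso
          have hl := congrArg List.length h
          simp only [List.length_append, List.length_cons] at hl
          have := pvLen_flatMap_ge ls t
          omega
        · rintro ⟨hc, -⟩
          exfalso
          simp [hm, h2] at hc

-- ===== VERDICT (by name: the statement is the Claim_ definition above) =====
theorem palabraAdivinada_spec : Claim_equal_palabraAdivinada := by
  intro palabra letras _
  unfold Spec_palabraAdivinada palabraAdivinada palabraAdivinada_alt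
  rw [PySem.List.foldl_append_eq_flatMap, List.nil_append]
  by_cases h : palabra.toList.flatMap (pvTokA letras.toList) = palabra.toList
  · rw [if_pos h]
    exact ((pvMask_eq_iff _ _).mp h).symm
  · have hb : ¬ (palabra.toList.all (fun c => letras.toList.contains c || c == ' ') = true) :=
      fun hb => h ((pvMask_eq_iff _ _).mpr hb)
    rw [if_neg h]
    exact (Bool.eq_false_iff.mpr hb).symm
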